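-- pv_equiv track=rewrite | github.com/CharlesterWide/CursoSinNombre | entregaEjerciciosPython/Laura_basico/funciones.py | piramide
-- ===== SOURCE A (Python) =====
-- def piramide(numer):
--     caden = ""
--     for fila in range(1,numer + 1):
--         for esp in range(1,(numer - fila) + 1):
--             caden = caden + " "
--
--         for dec in range(fila, 0,-1):
--             caden = caden + str(dec)
--
--         for inc in range(2, fila+1 ,1):
--             caden = caden + str(inc)
--
--         caden = caden + "\n"
--     return caden
-- ===== SOURCE B (Python) =====
-- def piramide(numer):
--     out = []
--     core = ""
--     for f in range(1, numer + 1):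
--         core = str(f) + core + str(f) if f > 1 else "1"
--         out.append(" " * (numer - f) + core + "\n")
--     return "".join(out)
-- ===== Notes on version B (the rewrite author's own statement) =====
-- stated objective: faster
-- what changed: Instead of A's three per-row inner loops emitting every digit into one growing accumulator, B maintains the symmetric digit core across rows, wrapping it with str(f) on both ends each iteration, and joins the collected rows once; no per-digit inner loop remains.
import Mathlib
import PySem

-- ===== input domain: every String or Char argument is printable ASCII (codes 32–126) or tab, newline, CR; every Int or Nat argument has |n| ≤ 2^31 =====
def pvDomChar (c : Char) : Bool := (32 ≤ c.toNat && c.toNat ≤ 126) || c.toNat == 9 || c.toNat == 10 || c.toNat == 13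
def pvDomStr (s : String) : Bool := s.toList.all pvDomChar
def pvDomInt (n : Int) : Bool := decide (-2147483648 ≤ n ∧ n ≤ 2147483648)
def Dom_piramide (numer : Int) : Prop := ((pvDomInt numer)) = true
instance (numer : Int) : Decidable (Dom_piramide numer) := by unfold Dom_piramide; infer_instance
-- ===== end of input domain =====

-- B keeps the symmetric digit core across rows, wrapping it with str(f) on both ends each
-- iteration and joining the collected rows once, instead of A's three per-row inner loops
-- emitting every digit into one growing accumulator (objective: faster, constant factor).

-- ===== PORT A =====
def piramide (numer : Int) : String :=
  (PySem.List.pyRange 1 (numer + 1) 1).foldl (fun caden fila =>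
    let caden := (PySem.List.pyRange 1 ((numer - fila) + 1) 1).foldl
      (fun c _esp => c ++ " ") caden
    let caden := (PySem.List.pyRange fila 0 (-1)).foldl
      (fun c dec => c ++ PySem.Int.toStr dec) caden
    let caden := (PySem.List.pyRange 2 (fila + 1) 1).foldl
      (fun c inc => c ++ PySem.Int.toStr inc) caden
    caden ++ "\n") ""

-- ===== PORT B =====
def piramide_alt (numer : Int) : String :=
  let st := (PySem.List.pyRange 1 (numer + 1) 1).foldl
    (fun (p : List String × String) f =>
      let core := if 1 < f then PySem.Int.toStr f ++ p.2 ++ PySem.Int.toStr f else "1"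
      (p.1 ++ [String.ofList (List.replicate (numer - f).toNat ' ') ++ core ++ "\n"], core))
    ([], "")
  String.join st.1

-- ===== PRECONDITION & SPEC =====
def Spec_piramide (numer : Int) (out : String) : Prop := out = piramide_alt numer
instance (numer : Int) (out : String) : Decidable (Spec_piramide numer out) := by unfold Spec_piramide; infer_instance

-- ===== CLAIM (what is proved, stated in full; the proofs are below) =====
def Claim_equal_piramide : Prop := ∀ (numer : Int), Dom_piramide numer → Spec_piramide numer (piramide numer)

-- ===== LEMMAS AND PROOFS =====

theorem pvJoin_cons (s : String) (l : List String) :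
    String.join (s :: l) = s ++ String.join l := by
  simp [String.join_eq, String.ofList_append, String.ofList_toList]

theorem pvJoin_append (l1 l2 : List String) :
    String.join (l1 ++ l2) = String.join l1 ++ String.join l2 := by
  induction l1 with
  | nil => simp [String.join]
  | cons s l ih => simp [pvJoin_cons, ih, String.append_assoc]

-- an append-accumulating foldl is init ++ join of the pieces
theorem pvFoldl_append {α : Type} (L : List α) (f : α → String) (init : String) :
    L.foldl (fun c x => c ++ f x) init = init ++ String.join (L.map f) := by
  induction L generalizing init with
  | nil => simp [String.join]
  | cons a L ih => simp [List.foldl_cons, ih, pvJoin_cons, String.append_assoc]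

theorem pvJoin_replicate_space (n : Nat) :
    String.join (List.replicate n " ") = String.ofList (List.replicate n ' ') := by
  induction n with
  | zero => simp [String.join]
  | succ n ih =>
      rw [List.replicate_succ, pvJoin_cons, ih, List.replicate_succ,
          ← List.singleton_append, String.ofList_append]

-- the digit part of row 'fila' (A's two monotone ranges, joined)
def pvCore (fila : Int) : String :=
  String.join ((PySem.List.pyRange fila 0 (-1) ++ PySem.List.pyRange 2 (fila + 1) 1).map
    PySem.Int.toStr)

-- the whole row: leading spaces, digit core, newline
def pvRowA (numer fila : Int) : String :=
  String.ofList (List.replicate (numer - fila).toNat ' ') ++ pvCore fila ++ "\n"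

-- B's wrapping recurrence computes the digit core
theorem pvCore_rec (f : Int) (h : 1 ≤ f) :
    pvCore f = if 1 < f then PySem.Int.toStr f ++ pvCore (f - 1) ++ PySem.Int.toStr f
               else "1" := by
  by_cases h2 : 1 < f
  · rw [if_pos h2]
    unfold pvCore
    rw [PySem.List.pyRange_neg_one_cons (show (0:Int) < f by omega),
        PySem.List.pyRange_one_succ_right (show (2:Int) ≤ f by omega),
        show f - 1 + 1 = f from by omega]
    simp [List.map_append, pvJoin_append, pvJoin_cons, String.append_assoc]
    rfl
  · have : f = 1 := by omega
    subst this
    rw [if_neg h2]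
    decide

-- A's whole row equals pvRowA appended to the accumulator
theorem pvRow_eq (numer fila : Int) (caden : String) :
    ((((PySem.List.pyRange 1 ((numer - fila) + 1) 1).foldl (fun c _ => c ++ " ") caden
        |> (PySem.List.pyRange fila 0 (-1)).foldl (fun c dec => c ++ PySem.Int.toStr dec))
        |> (PySem.List.pyRange 2 (fila + 1) 1).foldl (fun c inc => c ++ PySem.Int.toStr inc))
        ++ "\n") =
      caden ++ pvRowA numer fila := by
  simp only [pvFoldl_append, pvRowA, pvCore, List.map_append, pvJoin_append]
  have hsp : String.join ((PySem.List.pyRange 1 ((numer - fila) + 1) 1).map (fun _ => " "))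
      = String.ofList (List.replicate (numer - fila).toNat ' ') := by
    rw [List.map_const', PySem.List.length_pyRange_one]
    have : ((numer - fila) + 1 - 1).toNat = (numer - fila).toNat := by omega
    rw [this, pvJoin_replicate_space]
  rw [hsp]
  simp [String.append_assoc]

-- B's fold over rows 1..f produces the row list and the current core
theorem pvFoldB_eq (numer : Int) : ∀ (k : Nat) (f : Int), f.toNat = k →
    (PySem.List.pyRange 1 (f + 1) 1).foldl
      (fun (p : List String × String) f =>
        let core := if 1 < f then PySem.Int.toStr f ++ p.2 ++ PySem.Int.toStr f else "1"
        (p.1 ++ [String.ofList (List.replicate (numer - f).toNat ' ') ++ core ++ "\n"], core))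
      ([], "") =
    ((PySem.List.pyRange 1 (f + 1) 1).map (pvRowA numer),
      if f < 1 then "" else pvCore f) := by
  intro k
  induction k with
  | zero =>
      intro f h
      rw [PySem.List.pyRange_one_eq_nil (by omega), if_pos (by omega)]
      rfl
  | succ k ih =>
      intro f h
      have h1 : (1:Int) ≤ f := by omega
      have ihf := ih (f - 1) (by omega)
      rw [show f - 1 + 1 = f from by omega] at ihf
      rw [PySem.List.pyRange_one_succ_right h1, List.foldl_append, ihf,
          List.map_append, List.foldl_cons, List.foldl_nil]
      simp only
      have hcore : (if 1 < f then
          PySem.Int.toStr f ++ (if f - 1 < 1 then "" else pvCore (f - 1)) ++ PySem.Int.toStr f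
          else "1") = pvCore f := by
        rw [pvCore_rec f h1]
        by_cases h2 : 1 < f
        · rw [if_pos h2, if_pos h2, if_neg (show ¬ (f - 1 < 1) by omega)]
        · rw [if_neg h2, if_neg h2]
      rw [hcore, if_neg (show ¬ (f < 1) by omega)]
      simp [pvRowA]

-- ===== VERDICT (by name: the statement is the Claim_ definition above) =====
theorem piramide_spec : Claim_equal_piramide := by
  intro numer _
  unfold Spec_piramide piramide piramide_alt
  have key : ∀ (L : List Int) (init : String),
      L.foldl (fun caden fila =>
        let caden := (PySem.List.pyRange 1 ((numer - fila) + 1) 1).foldl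
          (fun c _esp => c ++ " ") caden
        let caden := (PySem.List.pyRange fila 0 (-1)).foldl
          (fun c dec => c ++ PySem.Int.toStr dec) caden
        let caden := (PySem.List.pyRange 2 (fila + 1) 1).foldl
          (fun c inc => c ++ PySem.Int.toStr inc) caden
        caden ++ "\n") init =
      init ++ String.join (L.map (pvRowA numer)) := by
    intro L
    induction L with
    | nil => intro init; simp [String.join]
    | cons a L ih =>
        intro init
        rw [List.foldl_cons]
        simp only
        rw [ih, List.map_cons, pvJoin_cons, ← String.append_assoc]
        congr 1
        exact pvRow_eq numer a init
  rw [key _ "", pvFoldB_eq numer numer.toNat numer rfl]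
  simp
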